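-- pv_equiv track=rewrite | github.com/Spdware/Advent_Of_Code | Advent_of_Code_Day_5/AoC_D5.py | create_diagonal
-- ===== SOURCE A (Python) =====
-- def create_diagonal(start,end):
--     path = set()
--     y = start[1]
--     if(start[0]<end[0] and start[1]<end[1]):
--         for i in range(start[0],end[0]+1):
--             path.add(tuple((i,y)))
--             y+=1
--     elif start[0]>end[0] and start[1]<end[1]:
--         for i in range(start[0],end[0]-1,-1):
--             path.add(tuple((i,y)))
--             y+=1
--     elif start[0]<end[0] and start[1]>end[1]:
--         for i in range(start[0],end[0]+1):
--             path.add(tuple((i,y)))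
--             y-=1
--     elif start[0]>end[0] and start[1]>end[1]:
--         for i in range(start[0],end[0]-1,-1):
--             path.add(tuple((i,y)))
--             y-=1
--     return path
-- ===== SOURCE B (Python) =====
-- def create_diagonal(start, end):
--     # divide-and-conquer: build the point list by halving the index range 0..n,
--     # then deduplicate once at the end
--     if start[0] == end[0] or start[1] == end[1]:
--         return set()
--     sx = 1 if end[0] > start[0] else -1
--     sy = 1 if end[1] > start[1] else -1
--     return set(_seg(start, abs(end[0] - start[0]), sx, sy))
--
-- def _seg(p, n, sx, sy):
--     # the points with indices 0..n of the diagonal walk starting at p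
--     if n == 0:
--         return [p]
--     h = n // 2
--     mid = (p[0] + sx * (h + 1), p[1] + sy * (h + 1))
--     return _seg(p, h, sx, sy) + _seg(mid, n - h - 1, sx, sy)
-- ===== Notes on version B (the rewrite author's own statement) =====
-- stated objective: alternative
-- what changed: Replaces A's four direction-cased linear loops with a mutable y counter by a divide-and-conquer recursion that builds the point list by halving the index range 0..|dx| (depth O(log n)) and deduplicates once at the end.
import Mathlib
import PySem

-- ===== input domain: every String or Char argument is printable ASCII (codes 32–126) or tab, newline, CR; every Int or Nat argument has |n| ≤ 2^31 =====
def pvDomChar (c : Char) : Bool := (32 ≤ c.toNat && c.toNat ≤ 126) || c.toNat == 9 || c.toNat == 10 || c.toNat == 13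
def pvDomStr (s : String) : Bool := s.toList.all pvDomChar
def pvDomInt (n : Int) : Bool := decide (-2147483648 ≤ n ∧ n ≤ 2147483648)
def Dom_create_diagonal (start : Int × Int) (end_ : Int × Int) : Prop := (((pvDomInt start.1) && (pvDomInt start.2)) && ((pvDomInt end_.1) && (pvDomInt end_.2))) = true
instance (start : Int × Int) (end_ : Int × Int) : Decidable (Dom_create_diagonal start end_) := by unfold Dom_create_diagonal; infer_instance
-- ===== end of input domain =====

-- B replaces A's four direction-cased linear loops by a divide-and-conquer recursion
-- on the index range (objective: alternative).

-- ===== PORT A =====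
-- literal transliteration: set 'path', counter 'y', four branches, each a loop over the x-range
def create_diagonal (start : Int × Int) (end_ : Int × Int) : List (Int × Int) :=
  let path : PySem.Set (Int × Int) := PySem.Set.empty
  let y : Int := start.2
  if start.1 < end_.1 ∧ start.2 < end_.2 then
    ((PySem.List.pyRange start.1 (end_.1 + 1) 1).foldl
      (fun (st : PySem.Set (Int × Int) × Int) i => (PySem.Set.add st.1 (i, st.2), st.2 + 1))
      (path, y)).1
  else if start.1 > end_.1 ∧ start.2 < end_.2 then
    ((PySem.List.pyRange start.1 (end_.1 - 1) (-1)).foldl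
      (fun (st : PySem.Set (Int × Int) × Int) i => (PySem.Set.add st.1 (i, st.2), st.2 + 1))
      (path, y)).1
  else if start.1 < end_.1 ∧ start.2 > end_.2 then
    ((PySem.List.pyRange start.1 (end_.1 + 1) 1).foldl
      (fun (st : PySem.Set (Int × Int) × Int) i => (PySem.Set.add st.1 (i, st.2), st.2 - 1))
      (path, y)).1
  else if start.1 > end_.1 ∧ start.2 > end_.2 then
    ((PySem.List.pyRange start.1 (end_.1 - 1) (-1)).foldl
      (fun (st : PySem.Set (Int × Int) × Int) i => (PySem.Set.add st.1 (i, st.2), st.2 - 1))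
      (path, y)).1
  else path

-- ===== PORT B =====
-- literal transliteration of Source B's helper _seg: divide and conquer on the index range 0..n
def pvSeg (p : Int × Int) (n : Nat) (sx sy : Int) : List (Int × Int) :=
  if n = 0 then [p]
  else
    let h := n / 2
    let mid : Int × Int := (p.1 + sx * ((h : Int) + 1), p.2 + sy * ((h : Int) + 1))
    pvSeg p h sx sy ++ pvSeg mid (n - h - 1) sx sy
termination_by n
decreasing_by all_goals omega

-- literal transliteration of Source B: degenerate guard, signs, then set(_seg(...))
def create_diagonal_alt (start : Int × Int) (end_ : Int × Int) : List (Int × Int) :=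
  if start.1 = end_.1 ∨ start.2 = end_.2 then PySem.Set.empty
  else
    let sx : Int := if end_.1 > start.1 then 1 else -1
    let sy : Int := if end_.2 > start.2 then 1 else -1
    PySem.Set.ofList (pvSeg start (end_.1 - start.1).natAbs sx sy)

-- ===== PRECONDITION & SPEC =====
def Spec_create_diagonal (start : Int × Int) (end_ : Int × Int) (out : List (Int × Int)) : Prop := out = create_diagonal_alt start end_
instance (start : Int × Int) (end_ : Int × Int) (out : List (Int × Int)) : Decidable (Spec_create_diagonal start end_ out) := by unfold Spec_create_diagonal; infer_instance

-- ===== CLAIM (what is proved, stated in full; the proofs are below) =====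
def Claim_equal_create_diagonal : Prop := ∀ (start : Int × Int) (end_ : Int × Int), Dom_create_diagonal start end_ → Spec_create_diagonal start end_ (create_diagonal start end_)

-- ===== LEMMAS AND PROOFS =====

-- Set.add appends a fresh element
theorem set_add_fresh (acc : List (Int × Int)) (x : Int × Int) (hx : x ∉ acc) :
    PySem.Set.add acc x = acc ++ [x] := by
  simp [PySem.Set.add, PySem.Set.contains]
  intro h
  exact absurd h hx

-- folding Set.add over a duplicate-free, acc-fresh list just appends it
theorem foldl_set_add (l : List (Int × Int)) : ∀ (acc : List (Int × Int)),
    l.Nodup → (∀ x ∈ l, x ∉ acc) → l.foldl PySem.Set.add acc = acc ++ l := by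
  induction l with
  | nil => intro acc _ _; simp
  | cons a l ih =>
    intro acc hnd hfresh
    have ha : a ∉ acc := hfresh a (by simp)
    rw [List.foldl_cons, set_add_fresh acc a ha,
        ih (acc ++ [a]) hnd.of_cons]
    · simp
    · intro x hx
      simp only [List.mem_append, List.mem_singleton]
      rintro (h | rfl)
      · exact hfresh x (by simp [hx]) h
      · exact (List.nodup_cons.mp hnd).1 hx

-- the master loop lemma: A's per-branch fold, with signs sx, sy ∈ {±1}
theorem diag_fold (sx sy : Int) (hsx : sx = 1 ∨ sx = -1) :
    ∀ (n : Nat) (x0 y0 : Int) (acc : List (Int × Int)),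
      (∀ k : Nat, k ≤ n → (x0 + sx * (k : Int), y0 + sy * (k : Int)) ∉ acc) →
      (((List.range (n + 1)).map (fun (k : Nat) => x0 + sx * (k : Int))).foldl
          (fun (st : PySem.Set (Int × Int) × Int) i => (PySem.Set.add st.1 (i, st.2), st.2 + sy))
          (acc, y0)).1
        = acc ++ (List.range (n + 1)).map (fun (k : Nat) => (x0 + sx * (k : Int), y0 + sy * (k : Int))) := by
  intro n
  induction n with
  | zero =>
    intro x0 y0 acc hfresh
    have h0 : (x0, y0) ∉ acc := by
      have := hfresh 0 (by omega); simpa using this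
    simp only [Nat.zero_add, List.range_one, List.map_cons, List.map_nil, List.foldl_cons, List.foldl_nil,
      Nat.cast_zero, mul_zero, add_zero]
    rw [set_add_fresh acc _ h0]
  | succ n ih =>
    intro x0 y0 acc hfresh
    have h0 : (x0, y0) ∉ acc := by
      have := hfresh 0 (by omega); simpa using this
    rw [List.range_succ_eq_map, List.map_cons, List.map_cons, List.foldl_cons, List.map_map, List.map_map]
    simp only [Nat.cast_zero, mul_zero, add_zero]
    rw [set_add_fresh acc _ h0]
    have hmapL : ((List.range (n + 1)).map ((fun (k : Nat) => x0 + sx * (k : Int)) ∘ Nat.succ))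
        = (List.range (n + 1)).map (fun (k : Nat) => (x0 + sx) + sx * (k : Int)) := by
      apply List.map_congr_left; intro k _
      simp only [Function.comp]; push_cast; ring
    have hmapR : ((List.range (n + 1)).map
          ((fun (k : Nat) => (x0 + sx * (k : Int), y0 + sy * (k : Int))) ∘ Nat.succ))
        = (List.range (n + 1)).map
            (fun (k : Nat) => ((x0 + sx) + sx * (k : Int), (y0 + sy) + sy * (k : Int))) := by
      apply List.map_congr_left; intro k _
      simp only [Function.comp, Prod.mk.injEq]; push_cast
      constructor <;> ring
    rw [hmapL, hmapR]
    have hfresh' : ∀ k : Nat, k ≤ n →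
        ((x0 + sx) + sx * (k : Int), (y0 + sy) + sy * (k : Int)) ∉ acc ++ [(x0, y0)] := by
      intro k hk
      simp only [List.mem_append, List.mem_singleton]
      rintro (h | h)
      · have hk1 := hfresh (k + 1) (by omega)
        apply hk1
        have he : (x0 + sx * (((k + 1 : Nat)) : Int), y0 + sy * (((k + 1 : Nat)) : Int))
            = ((x0 + sx) + sx * (k : Int), (y0 + sy) + sy * (k : Int)) := by
          simp only [Prod.mk.injEq]; push_cast; constructor <;> ring
        rw [he]; exact h
      · have hx : (x0 + sx) + sx * (k : Int) = x0 := by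
          have := congrArg Prod.fst h; simpa using this
        rcases hsx with rfl | rfl <;> omega
    rw [ih (x0 + sx) (y0 + sy) (acc ++ [(x0, y0)]) hfresh']
    simp [List.append_assoc]

-- Set.ofList of a duplicate-free list is itself
theorem ofList_nodup (l : List (Int × Int)) (h : l.Nodup) : PySem.Set.ofList l = l := by
  rw [PySem.Set.ofList_eq_foldl]
  have := foldl_set_add l [] h (by simp)
  simpa using this

-- the diagonal point list is duplicate-free (x-coordinates are injective in k)
theorem diag_nodup (sx sy x0 y0 : Int) (hsx : sx = 1 ∨ sx = -1) (n : Nat) :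
    ((List.range (n + 1)).map (fun (k : Nat) => (x0 + sx * (k : Int), y0 + sy * (k : Int)))).Nodup := by
  apply List.Nodup.map_on _ (List.nodup_range)
  intro a _ b _ hab
  have hx : x0 + sx * (a : Int) = x0 + sx * (b : Int) := by
    have := congrArg Prod.fst hab; simpa using this
  rcases hsx with rfl | rfl <;> omega

-- B's divide-and-conquer recursion computes the plain diagonal point list
theorem seg_closed (sx sy : Int) :
    ∀ (n : Nat) (x0 y0 : Int),
      pvSeg (x0, y0) n sx sy
        = (List.range (n + 1)).map (fun (k : Nat) => (x0 + sx * (k : Int), y0 + sy * (k : Int))) := by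
  intro n
  induction n using Nat.strong_induction_on with
  | _ n ih =>
    intro x0 y0
    rcases Nat.eq_zero_or_pos n with rfl | hn
    · simp [pvSeg]
    · rw [pvSeg, if_neg (by omega)]
      simp only
      rw [ih (n / 2) (by omega), ih (n - n / 2 - 1) (by omega)]
      have hsplit : List.range (n + 1)
          = List.range (n / 2 + 1) ++ (List.range (n - n / 2 - 1 + 1)).map (fun k => n / 2 + 1 + k) := by
        have h : n + 1 = (n / 2 + 1) + (n - n / 2 - 1 + 1) := by omega
        rw [h, List.range_add]
      rw [hsplit, List.map_append, List.map_map]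
      congr 1
      apply List.map_congr_left; intro k _
      simp only [Function.comp, Prod.mk.injEq]
      push_cast
      constructor <;> ring

-- ===== VERDICT (by name: the statement is the Claim_ definition above) =====
theorem create_diagonal_spec : Claim_equal_create_diagonal := by
  intro start end_ _hdom
  unfold Spec_create_diagonal create_diagonal create_diagonal_alt
  obtain ⟨x0, y0⟩ := start
  obtain ⟨e0, e1⟩ := end_
  simp only [PySem.Set.empty]
  by_cases h1 : x0 < e0 ∧ y0 < e1
  · rw [if_pos h1, if_neg (by omega), if_pos (by omega), if_pos (by omega)]
    have hn : (e0 - x0).natAbs = (e0 - x0).toNat := by omega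
    have hr : PySem.List.pyRange x0 (e0 + 1) 1
        = (List.range ((e0 - x0).toNat + 1)).map (fun (k : Nat) => x0 + 1 * (k : Int)) := by
      rw [PySem.List.pyRange_one]
      have : ((e0 + 1) - x0).toNat = (e0 - x0).toNat + 1 := by omega
      rw [this]; apply List.map_congr_left; intro k _; ring
    rw [hn, hr, diag_fold 1 1 (Or.inl rfl) ((e0 - x0).toNat) x0 y0 [] (by simp),
        seg_closed 1 1 ((e0 - x0).toNat) x0 y0,
        ofList_nodup _ (diag_nodup 1 1 x0 y0 (Or.inl rfl) _)]
    simp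
  · by_cases h2 : x0 > e0 ∧ y0 < e1
    · rw [if_neg h1, if_pos h2, if_neg (by omega), if_neg (by omega), if_pos (by omega)]
      have hn : (e0 - x0).natAbs = (x0 - e0).toNat := by omega
      have hr : PySem.List.pyRange x0 (e0 - 1) (-1)
          = (List.range ((x0 - e0).toNat + 1)).map (fun (k : Nat) => x0 + (-1) * (k : Int)) := by
        rw [PySem.List.pyRange_neg_one]
        have : (x0 - (e0 - 1)).toNat = (x0 - e0).toNat + 1 := by omega
        rw [this]; apply List.map_congr_left; intro k _; ring
      rw [hn, hr, diag_fold (-1) 1 (Or.inr rfl) ((x0 - e0).toNat) x0 y0 [] (by simp),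
          seg_closed (-1) 1 ((x0 - e0).toNat) x0 y0,
          ofList_nodup _ (diag_nodup (-1) 1 x0 y0 (Or.inr rfl) _)]
      simp
    · by_cases h3 : x0 < e0 ∧ y0 > e1
      · rw [if_neg h1, if_neg h2, if_pos h3, if_neg (by omega), if_pos (by omega), if_neg (by omega)]
        have hstep : (fun (st : PySem.Set (Int × Int) × Int) i => (PySem.Set.add st.1 (i, st.2), st.2 - 1))
            = (fun (st : PySem.Set (Int × Int) × Int) i => (PySem.Set.add st.1 (i, st.2), st.2 + (-1))) := by
          funext st i; simp [sub_eq_add_neg]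
        have hn : (e0 - x0).natAbs = (e0 - x0).toNat := by omega
        have hr : PySem.List.pyRange x0 (e0 + 1) 1
            = (List.range ((e0 - x0).toNat + 1)).map (fun (k : Nat) => x0 + 1 * (k : Int)) := by
          rw [PySem.List.pyRange_one]
          have : ((e0 + 1) - x0).toNat = (e0 - x0).toNat + 1 := by omega
          rw [this]; apply List.map_congr_left; intro k _; ring
        rw [hstep, hn, hr, diag_fold 1 (-1) (Or.inl rfl) ((e0 - x0).toNat) x0 y0 [] (by simp),
            seg_closed 1 (-1) ((e0 - x0).toNat) x0 y0,
            ofList_nodup _ (diag_nodup 1 (-1) x0 y0 (Or.inl rfl) _)]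
        simp
      · by_cases h4 : x0 > e0 ∧ y0 > e1
        · rw [if_neg h1, if_neg h2, if_neg h3, if_pos h4, if_neg (by omega), if_neg (by omega), if_neg (by omega)]
          have hstep : (fun (st : PySem.Set (Int × Int) × Int) i => (PySem.Set.add st.1 (i, st.2), st.2 - 1))
              = (fun (st : PySem.Set (Int × Int) × Int) i => (PySem.Set.add st.1 (i, st.2), st.2 + (-1))) := by
            funext st i; simp [sub_eq_add_neg]
          have hn : (e0 - x0).natAbs = (x0 - e0).toNat := by omega
          have hr : PySem.List.pyRange x0 (e0 - 1) (-1)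
              = (List.range ((x0 - e0).toNat + 1)).map (fun (k : Nat) => x0 + (-1) * (k : Int)) := by
            rw [PySem.List.pyRange_neg_one]
            have : (x0 - (e0 - 1)).toNat = (x0 - e0).toNat + 1 := by omega
            rw [this]; apply List.map_congr_left; intro k _; ring
          rw [hstep, hn, hr, diag_fold (-1) (-1) (Or.inr rfl) ((x0 - e0).toNat) x0 y0 [] (by simp),
              seg_closed (-1) (-1) ((x0 - e0).toNat) x0 y0,
              ofList_nodup _ (diag_nodup (-1) (-1) x0 y0 (Or.inr rfl) _)]
          simp
        · rw [if_neg h1, if_neg h2, if_neg h3, if_neg h4, if_pos (by omega)]
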